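-- pv_equiv track=rewrite | github.com/atlas10280/SEE_TC | src/lib/extract_array_nd2.py | update_duplicates_with_suffix
-- ===== SOURCE A (Python) =====
-- def update_duplicates_with_suffix(arr):
--     from collections import defaultdict
--     # Dictionary to track occurrences of each string
--     counts = defaultdict(int)
--
--     # Iterate over the array and update duplicates with a suffix
--     for i, value in enumerate(arr):
--         counts[value] += 1
--         if counts[value] > 1:
--             arr[i] = f"{value}_{counts[value] - 1}"
--     return arr
-- ===== SOURCE B (Python) =====
-- def update_duplicates_with_suffix(arr):
--     # Two staged passes: group all positions by value first, then rewrite each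
--     # group's later occurrences in place with their 1-based occurrence number.
--     positions = {}
--     for i, v in enumerate(arr):
--         positions.setdefault(v, []).append(i)
--     for v, idxs in positions.items():
--         for m, i in enumerate(idxs[1:], 1):
--             arr[i] = f"{v}_{m}"
--     return arr
-- ===== Notes on version B (the rewrite author's own statement) =====
-- stated objective: alternative
-- what changed: Replaces A's single interleaved pass (running counter dict, conditional rewrite while scanning) by two staged passes: first group all positions by value into a dict of index lists, then for each value rewrite its second-and-later positions in place with their 1-based occurrence number.
import Mathlib
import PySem

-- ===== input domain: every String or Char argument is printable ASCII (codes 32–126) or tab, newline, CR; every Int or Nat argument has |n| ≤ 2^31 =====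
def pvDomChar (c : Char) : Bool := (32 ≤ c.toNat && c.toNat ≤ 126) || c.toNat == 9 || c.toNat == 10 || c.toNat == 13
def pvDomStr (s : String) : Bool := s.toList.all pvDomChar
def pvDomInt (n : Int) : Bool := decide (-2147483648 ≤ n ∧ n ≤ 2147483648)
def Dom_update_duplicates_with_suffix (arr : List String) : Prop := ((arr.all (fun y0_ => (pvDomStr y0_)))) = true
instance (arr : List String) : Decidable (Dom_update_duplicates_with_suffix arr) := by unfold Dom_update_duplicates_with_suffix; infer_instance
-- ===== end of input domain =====

-- B replaces A's interleaved counter-and-rewrite pass by two staged passes (group positions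
-- by value into a dict, then rewrite each group's later occurrences); both Pythons mutate
-- arr in place to the same contents, and the equivalence proved is about the returned list.


-- ===== PORT A =====
-- one iteration of A's for-loop: bump counts[value], suffix arr[i] when counts[value] > 1
def udsStep (st : PySem.Dict String Int × List String) (p : Int × String) :
    PySem.Dict String Int × List String :=
  let counts := st.1.insert p.2 (st.1.getD p.2 0 + 1)
  if counts.getD p.2 0 > 1 then
    (counts, st.2.set p.1.toNat (p.2 ++ "_" ++ PySem.Int.toStr (counts.getD p.2 0 - 1)))
  else
    (counts, st.2)

def update_duplicates_with_suffix (arr : List String) : List String :=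
  ((PySem.List.enumerate arr 0).foldl udsStep (PySem.Dict.empty, arr)).2

-- ===== PORT B =====
def update_duplicates_with_suffix_alt (arr : List String) : List String :=
  -- pass 1: positions = {}; for i, v in enumerate(arr): positions.setdefault(v, []).append(i)
  let positions : PySem.Dict String (List Int) :=
    (PySem.List.enumerate arr 0).foldl (fun d p => d.modify p.2 [] (· ++ [p.1])) PySem.Dict.empty
  -- pass 2: for v, idxs in positions.items(): for m, i in enumerate(idxs[1:], 1): arr[i] = f"{v}_{m}"
  positions.items.foldl
    (fun acc pv =>
      (PySem.List.enumerate (PySem.List.slice pv.2 (some 1) none) 1).foldl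
        (fun a q => a.set q.2.toNat (pv.1 ++ "_" ++ PySem.Int.toStr q.1)) acc)
    arr

-- ===== PRECONDITION & SPEC =====
def Spec_update_duplicates_with_suffix (arr : List String) (out : List String) : Prop := out = update_duplicates_with_suffix_alt arr
instance (arr : List String) (out : List String) : Decidable (Spec_update_duplicates_with_suffix arr out) := by unfold Spec_update_duplicates_with_suffix; infer_instance

-- ===== CLAIM (what is proved, stated in full; the proofs are below) =====
def Claim_equal_update_duplicates_with_suffix : Prop := ∀ (arr : List String), Dom_update_duplicates_with_suffix arr → Spec_update_duplicates_with_suffix arr (update_duplicates_with_suffix arr)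

-- ===== LEMMAS AND PROOFS =====

-- the value both programs put at position j: the original entry, suffixed by the
-- number of earlier equal entries when that number is nonzero
def udsOut (full : List String) (j : Nat) : String :=
  let v := full.getD j ""
  let c := (full.take j).count v
  if c = 0 then v else v ++ "_" ++ PySem.Int.toStr (c : Int)

-- ---------- A side: the interleaved pass computes udsOut pointwise ----------

lemma drop_head {l : List String} {k : Nat} {v : String} {rest : List String}
    (h : l.drop k = v :: rest) : l.getD k "" = v := by
  have h0 : (l.drop k)[0]? = some v := by rw [h]; rfl
  rw [List.getElem?_drop, Nat.add_zero] at h0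
  simp [List.getD, h0]

lemma drop_tail {l : List String} {k : Nat} {v : String} {rest : List String}
    (h : l.drop k = v :: rest) : l.drop (k + 1) = rest := by
  have h1 : (l.drop k).drop 1 = rest := by rw [h]; rfl
  rwa [List.drop_drop] at h1

lemma drop_lt {l : List String} {k : Nat} {v : String} {rest : List String}
    (h : l.drop k = v :: rest) : k < l.length := by
  by_contra hc
  simp [List.drop_eq_nil_of_le (by omega : l.length ≤ k)] at h

lemma take_succ_count (l : List String) (k : Nat) (hk : k < l.length) (w : String) :
    (l.take (k + 1)).count w
      = (l.take k).count w + (if w = l.getD k "" then 1 else 0) := by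
  rw [← List.take_append_getElem hk, List.count_append, List.getD_eq_getElem l "" hk]
  congr 1
  by_cases hw : w = l[k]
  · simp [hw]
  · simp [hw, Ne.symm hw]

lemma uds_inv (rest : List String) : ∀ (full : List String) (k : Nat)
    (d : PySem.Dict String Int) (acc : List String),
    full.drop k = rest →
    acc.length = full.length →
    (∀ v, d.getD v 0 = ((full.take k).count v : Int)) →
    (∀ j, j < k → acc.getD j "" = udsOut full j) →
    (∀ j, k ≤ j → acc.getD j "" = full.getD j "") →
    (((PySem.List.enumerate rest (k : Int)).foldl udsStep (d, acc)).2.length = full.length ∧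
      ∀ j, j < full.length →
        ((PySem.List.enumerate rest (k : Int)).foldl udsStep (d, acc)).2.getD j ""
          = udsOut full j) := by
  induction rest with
  | nil =>
    intro full k d acc hdrop hlen _ h4 _
    have hk : full.length ≤ k := by
      by_contra hc
      have := List.drop_eq_nil_iff.mp hdrop
      omega
    simpa [PySem.List.enumerate] using ⟨hlen, fun j hj => h4 j (by omega)⟩
  | cons v rest' ih =>
    intro full k d acc hdrop hlen h3 h4 h5
    have hk : k < full.length := drop_lt hdrop
    have hv : full.getD k "" = v := drop_head hdrop
    have hdrop' : full.drop (k + 1) = rest' := drop_tail hdrop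
    rw [PySem.List.enumerate_cons, List.foldl_cons]
    have hstepd : (udsStep (d, acc) ((k : Int), v)).1
        = d.insert v (d.getD v 0 + 1) := by
      simp only [udsStep]; split <;> rfl
    set c : Nat := (full.take k).count v with hc
    have hcnt : (d.insert v (d.getD v 0 + 1)).getD v 0 = (c : Int) + 1 := by
      rw [PySem.Dict.getD_insert_self, h3]
    have hd' : ∀ w, (d.insert v (d.getD v 0 + 1)).getD w 0
        = ((full.take (k + 1)).count w : Int) := by
      intro w
      rw [PySem.Dict.getD_insert, take_succ_count full k hk w, hv]
      by_cases hw : w = v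
      · subst hw; simp [h3]
      · simp [hw, h3]
    by_cases hzero : c = 0
    · -- counts[value] = 1: no rewrite of arr
      have hstep : udsStep (d, acc) ((k : Int), v) = (d.insert v (d.getD v 0 + 1), acc) := by
        simp only [udsStep]
        rw [if_neg]
        rw [PySem.Dict.getD_insert_self, h3]
        simp [← hc, hzero]
      rw [hstep]
      have := ih full (k + 1) (d.insert v (d.getD v 0 + 1)) acc hdrop' hlen hd'
        (fun j hj => by
          rcases Nat.lt_succ_iff_lt_or_eq.mp hj with hj' | hj'
          · exact h4 j hj'
          · subst hj'
            rw [h5 j le_rfl, hv, udsOut, hv, ← hc, hzero]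
            simp)
        (fun j hj => h5 j (by omega))
      simpa [Nat.cast_add, Nat.cast_one] using this
    · -- duplicate: arr[k] gets the suffix
      have hstep : udsStep (d, acc) ((k : Int), v)
          = (d.insert v (d.getD v 0 + 1),
             acc.set k (v ++ "_" ++ PySem.Int.toStr (c : Int))) := by
        simp only [udsStep]
        rw [if_pos]
        · rw [PySem.Dict.getD_insert_self, h3, ← hc]
          have : ((c : Int) + 1) - 1 = (c : Int) := by ring
          rw [this]
          simp
        · rw [PySem.Dict.getD_insert_self, h3, ← hc]; omega
      rw [hstep]
      have hout : udsOut full k = v ++ "_" ++ PySem.Int.toStr (c : Int) := by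
        rw [udsOut, hv, ← hc]
        simp [hzero]
      have := ih full (k + 1) (d.insert v (d.getD v 0 + 1))
        (acc.set k (v ++ "_" ++ PySem.Int.toStr (c : Int))) hdrop'
        (by simpa using hlen) hd'
        (fun j hj => by
          rcases Nat.lt_succ_iff_lt_or_eq.mp hj with hj' | hj'
          · rw [List.getD, List.getElem?_set_ne (by omega)]
            exact h4 j hj'
          · subst hj'
            rw [List.getD, List.getElem?_set_self (by omega), Option.getD_some, hout])
        (fun j hj => by
          rw [List.getD, List.getElem?_set_ne (by omega)]
          exact h5 j (by omega))
      simpa [Nat.cast_add, Nat.cast_one] using this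

lemma A_pointwise (arr : List String) :
    (update_duplicates_with_suffix arr).length = arr.length ∧
      ∀ j, j < arr.length → (update_duplicates_with_suffix arr).getD j "" = udsOut arr j := by
  unfold update_duplicates_with_suffix
  have := uds_inv arr arr 0 PySem.Dict.empty arr
    (by simp) rfl (by simp) (fun j hj => by omega) (fun j _ => rfl)
  rw [show ((0 : Int)) = ((0 : Nat) : Int) from rfl]
  exact this

-- ---------- B side ----------

-- positions of v in l, absolute offsets starting at k
def occPos (l : List String) (v : String) (k : Nat) : List Nat :=
  match l with
  | [] => []
  | x :: xs => if x = v then k :: occPos xs v (k + 1) else occPos xs v (k + 1)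

lemma occPos_mem : ∀ (l : List String) (v : String) (k j : Nat), j ∈ occPos l v k →
    k ≤ j ∧ j - k < l.length ∧ l.getD (j - k) "" = v := by
  intro l
  induction l with
  | nil => intro v k j h; simp [occPos] at h
  | cons x xs ih =>
    intro v k j h
    by_cases hx : x = v
    · simp only [occPos, if_pos hx, List.mem_cons] at h
      rcases h with h | h
      · subst h; simp [hx]
      · obtain ⟨h1, h2, h3⟩ := ih v (k + 1) j h
        refine ⟨by omega, by simp; omega, ?_⟩
        have : j - k = (j - (k + 1)) + 1 := by omega
        rw [this]
        simpa using h3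
    · simp only [occPos, if_neg hx] at h
      obtain ⟨h1, h2, h3⟩ := ih v (k + 1) j h
      refine ⟨by omega, by simp; omega, ?_⟩
      have : j - k = (j - (k + 1)) + 1 := by omega
      rw [this]
      simpa using h3

lemma occPos_nodup : ∀ (l : List String) (v : String) (k : Nat), (occPos l v k).Nodup := by
  intro l
  induction l with
  | nil => intro v k; simp [occPos]
  | cons x xs ih =>
    intro v k
    by_cases hx : x = v
    · simp only [occPos, if_pos hx]
      refine List.nodup_cons.mpr ⟨fun hmem => ?_, ih v (k + 1)⟩
      have := (occPos_mem xs v (k + 1) k hmem).1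
      omega
    · simp only [occPos, if_neg hx]
      exact ih v (k + 1)

lemma occPos_cover : ∀ (l : List String) (v : String) (k j : Nat), j < l.length →
    l.getD j "" = v → (occPos l v k)[(l.take j).count v]? = some (k + j) := by
  intro l
  induction l with
  | nil => intro v k j h; simp at h
  | cons x xs ih =>
    intro v k j hj hv
    match j with
    | 0 =>
      simp at hv
      simp [occPos, hv]
    | j + 1 =>
      have hv' : xs.getD j "" = v := by simpa using hv
      have hj' : j < xs.length := by simpa using hj
      have hrec := ih v (k + 1) j hj' hv'
      rw [List.take_succ_cons]
      by_cases hx : x = v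
      · subst hx
        have hcnt : List.count x (x :: List.take j xs) = List.count x (List.take j xs) + 1 := by
          simp [List.count_cons]
        simp only [occPos, if_pos rfl, hcnt, if_true, eq_self_iff_true]
        rw [List.getElem?_cons_succ, hrec]
        congr 1
        omega
      · have hcnt : List.count v (x :: List.take j xs) = List.count v (List.take j xs) := by
          simp [List.count_cons, hx]
        simp only [occPos, if_neg hx, hcnt]
        rw [hrec]
        congr 1
        omega
  
-- the inner loop of B's second pass, as a named function (definitionally the port's fold)
def innerRun (v : String) (is : List Int) (m0 : Int) (acc : List String) : List String :=
  (PySem.List.enumerate is m0).foldl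
    (fun a q => a.set q.2.toNat (v ++ "_" ++ PySem.Int.toStr q.1)) acc

lemma innerRun_spec (v : String) : ∀ (is : List Nat) (m0 : Nat) (acc : List String),
    is.Nodup →
    (innerRun v (is.map Int.ofNat) (m0 : Int) acc).length = acc.length ∧
    (∀ t j, is[t]? = some j → j < acc.length →
      (innerRun v (is.map Int.ofNat) (m0 : Int) acc).getD j ""
        = v ++ "_" ++ PySem.Int.toStr ((m0 + t : Nat) : Int)) ∧
    (∀ j, j ∉ is →
      (innerRun v (is.map Int.ofNat) (m0 : Int) acc).getD j "" = acc.getD j "") := by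
  intro is
  induction is with
  | nil => intro m0 acc _; simp [innerRun, PySem.List.enumerate]
  | cons i rest ih =>
    intro m0 acc hnd
    obtain ⟨hni, hnd'⟩ := List.nodup_cons.mp hnd
    have hstep : innerRun v ((i :: rest).map Int.ofNat) (m0 : Int) acc
        = innerRun v (rest.map Int.ofNat) ((m0 : Int) + 1)
            (acc.set i (v ++ "_" ++ PySem.Int.toStr (m0 : Int))) := by
      simp [innerRun, PySem.List.enumerate_cons]
    have hcast : ((m0 : Int) + 1) = (((m0 + 1 : Nat)) : Int) := by push_cast; ring
    set acc' := acc.set i (v ++ "_" ++ PySem.Int.toStr (m0 : Int)) with hacc'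
    have hlen' : acc'.length = acc.length := by simp [hacc']
    obtain ⟨ihlen, ihhit, ihmiss⟩ := ih (m0 + 1) acc' hnd'
    rw [hstep, hcast]
    refine ⟨by rw [ihlen, hlen'], ?_, ?_⟩
    · intro t j ht hj
      match t with
      | 0 =>
        simp at ht
        subst ht
        rw [ihmiss i hni, hacc', List.getD, List.getElem?_set_self (by omega),
          Option.getD_some]
        norm_num
      | t + 1 =>
        rw [List.getElem?_cons_succ] at ht
        have := ihhit t j ht (by omega)
        rw [this]
        congr 2
        omega
    · intro j hj
      have hj1 : j ∉ rest := fun h => hj (List.mem_cons_of_mem _ h)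
      have hj2 : j ≠ i := fun h => hj (h ▸ List.mem_cons_self)
      rw [ihmiss j hj1, hacc', List.getD, List.getElem?_set_ne (by omega)]
      rfl

lemma outer_fold (arr : List String) : ∀ (vs : List String) (acc : List String),
    vs.Nodup → acc.length = arr.length →
    (∀ j, j < arr.length → arr.getD j "" ∈ vs → acc.getD j "" = arr.getD j "") →
    (vs.foldl (fun a v => innerRun v (((occPos arr v 0).map Int.ofNat).tail) 1 a) acc).length
        = arr.length ∧
    (∀ j, j < arr.length → arr.getD j "" ∈ vs →
      (vs.foldl (fun a v => innerRun v (((occPos arr v 0).map Int.ofNat).tail) 1 a) acc).getD j ""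
        = udsOut arr j) ∧
    (∀ j, arr.getD j "" ∉ vs →
      (vs.foldl (fun a v => innerRun v (((occPos arr v 0).map Int.ofNat).tail) 1 a) acc).getD j ""
        = acc.getD j "") := by
  intro vs
  induction vs with
  | nil =>
    intro acc _ hlen hpre
    exact ⟨hlen, fun j _ h => by simp at h, fun j _ => rfl⟩
  | cons v vs' ih =>
    intro acc hnd hlen hpre
    obtain ⟨hnv, hnd'⟩ := List.nodup_cons.mp hnd
    rw [List.foldl_cons]
    have htail : ((occPos arr v 0).map Int.ofNat).tail
        = ((occPos arr v 0).tail).map Int.ofNat := Eq.symm List.map_tail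
    have hone : (1 : Int) = ((1 : Nat) : Int) := rfl
    obtain ⟨ilen, ihit, imiss⟩ := by
      have := innerRun_spec v ((occPos arr v 0).tail) 1 acc
        ((occPos_nodup arr v 0).sublist (List.tail_sublist _))
      rw [← hone, ← htail] at this
      exact this
    set acc1 := innerRun v (((occPos arr v 0).map Int.ofNat).tail) 1 acc with hacc1
    -- positions whose value is not v are untouched by this inner loop
    have hmiss_val : ∀ j, arr.getD j "" ≠ v → acc1.getD j "" = acc.getD j "" := by
      intro j hne
      apply imiss
      intro hmem
      have hmem' : j ∈ occPos arr v 0 := List.mem_of_mem_tail hmem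
      obtain ⟨_, _, h3⟩ := occPos_mem arr v 0 j hmem'
      simp at h3
      exact hne h3
    -- positions holding v get exactly udsOut
    have hhit_val : ∀ j, j < arr.length → arr.getD j "" = v → acc1.getD j "" = udsOut arr j := by
      intro j hj hv
      have hcov := occPos_cover arr v 0 j hj hv
      rw [Nat.zero_add] at hcov
      cases hc0 : (arr.take j).count v with
      | zero =>
        rw [hc0] at hcov
        -- first occurrence: j is the head of occPos, untouched by the inner loop
        have hjn : j ∉ (occPos arr v 0).tail := by
          intro hmem
          have hnodup := occPos_nodup arr v 0
          cases hocc : occPos arr v 0 with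
          | nil => rw [hocc] at hcov; simp at hcov
          | cons a as =>
            rw [hocc] at hcov hmem hnodup
            simp at hcov
            subst hcov
            exact (List.nodup_cons.mp hnodup).1 hmem
        have hv2 : arr[j]?.getD "" = v := hv
        rw [imiss j hjn, hpre j hj (by rw [hv]; exact List.mem_cons_self), hv]
        simp [udsOut, List.getD, hv2, hc0]
      | succ t =>
        rw [hc0] at hcov
        have htl : ((occPos arr v 0).tail)[t]? = some j := by
          rw [List.getElem?_tail]; exact hcov
        have hv2 : arr[j]?.getD "" = v := hv
        rw [ihit t j htl (by omega)]
        simp [udsOut, List.getD, hv2, hc0, Nat.add_comm]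
    obtain ⟨rlen, rhit, rmiss⟩ := ih acc1 hnd' (by rw [ilen, hlen])
      (fun j hj hm => by
        rw [hmiss_val j (fun he => hnv (he ▸ hm))]
        exact hpre j hj (List.mem_cons_of_mem _ hm))
    refine ⟨rlen, ?_, ?_⟩
    · intro j hj hm
      rcases List.mem_cons.mp hm with he | hm'
      · rw [rmiss j (by rw [he]; exact hnv), hhit_val j hj he]
      · exact rhit j hj hm'
    · intro j hm
      have h1 : arr.getD j "" ∉ vs' := fun h => hm (List.mem_cons_of_mem _ h)
      have h2 : arr.getD j "" ≠ v := fun h => hm (by rw [h]; exact List.mem_cons_self)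
      rw [rmiss j h1, hmiss_val j h2]

-- pass 1 of B, per value: the dict holds exactly the occurrence positions of each value
lemma occ_filter_enumerate : ∀ (arr : List String) (v : String) (k : Nat),
    List.map (fun x => x.2) (List.filter (fun p => p.1 == v)
        ((PySem.List.enumerate arr (k : Int)).map Prod.swap))
      = (occPos arr v k).map Int.ofNat := by
  intro arr
  induction arr with
  | nil => intro v k; simp [PySem.List.enumerate, occPos]
  | cons x xs ih =>
    intro v k
    rw [PySem.List.enumerate_cons]
    have hcast : ((k : Int) + 1) = (((k + 1 : Nat)) : Int) := by push_cast; ring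
    by_cases hx : x = v
    · simp only [List.map_cons, Prod.swap_prod_mk, List.filter_cons, hx, beq_self_eq_true,
        if_true, occPos, hcast, ih]
      simp
    · have hbx : (x == v) = false := by simp [hx]
      simp only [List.map_cons, Prod.swap_prod_mk, List.filter_cons, hbx, occPos, if_neg hx,
        Bool.false_eq_true, if_false, hcast, ih]

lemma posDict_getD (arr : List String) (v : String) :
    ((PySem.List.enumerate arr 0).foldl (fun d p => d.modify p.2 [] (· ++ [p.1]))
        (PySem.Dict.empty : PySem.Dict String (List Int))).getD v []
      = (occPos arr v 0).map Int.ofNat := by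
  have hswap : (PySem.List.enumerate arr 0).foldl (fun d p => d.modify p.2 [] (· ++ [p.1]))
        (PySem.Dict.empty : PySem.Dict String (List Int))
      = ((PySem.List.enumerate arr 0).map Prod.swap).foldl
          (fun d p => d.modify p.1 [] (fun x => x ++ [p.2])) PySem.Dict.empty := by
    rw [List.foldl_map]; rfl
  rw [hswap, PySem.Dict.getD_foldl_modify_append, PySem.Dict.getD_empty, List.nil_append]
  exact occ_filter_enumerate arr v 0

lemma posDict_keys (arr : List String) :
    ((PySem.List.enumerate arr 0).foldl (fun d p => d.modify p.2 [] (· ++ [p.1]))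
        (PySem.Dict.empty : PySem.Dict String (List Int))).keys
      = PySem.Set.ofList arr := by
  have := PySem.Dict.keys_foldl_modify_key (PySem.List.enumerate arr 0) (fun p => p.2) []
    (fun _ p lst => lst ++ [p.1]) (PySem.Dict.empty : PySem.Dict String (List Int))
  rw [this, PySem.List.map_snd_enumerate]
  rfl

lemma posDict_nodup_keys (arr : List String) :
    ((PySem.List.enumerate arr 0).foldl (fun d p => d.modify p.2 [] (· ++ [p.1]))
        (PySem.Dict.empty : PySem.Dict String (List Int))).keys.Nodup := by
  exact PySem.Dict.nodup_keys_foldl_modify_key (PySem.List.enumerate arr 0) (fun p => p.2) []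
    (fun _ p lst => lst ++ [p.1]) PySem.Dict.empty PySem.Dict.nodup_keys_empty

lemma B_pointwise (arr : List String) :
    (update_duplicates_with_suffix_alt arr).length = arr.length ∧
      ∀ j, j < arr.length → (update_duplicates_with_suffix_alt arr).getD j "" = udsOut arr j := by
  have hzeta : update_duplicates_with_suffix_alt arr
      = ((PySem.List.enumerate arr 0).foldl (fun d p => d.modify p.2 [] (· ++ [p.1]))
          (PySem.Dict.empty : PySem.Dict String (List Int))).items.foldl
          (fun acc pv =>
            (PySem.List.enumerate (PySem.List.slice pv.2 (some 1) none) 1).foldl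
              (fun a q => a.set q.2.toNat (pv.1 ++ "_" ++ PySem.Int.toStr q.1)) acc)
          arr := rfl
  rw [hzeta, PySem.Dict.items_eq_map_keys _ (posDict_nodup_keys arr) [], posDict_keys arr,
    List.foldl_map]
  have hfun : (fun (acc : List String) (v : String) =>
      (PySem.List.enumerate (PySem.List.slice
          (((PySem.List.enumerate arr 0).foldl (fun d p => d.modify p.2 [] (· ++ [p.1]))
              (PySem.Dict.empty : PySem.Dict String (List Int))).getD v []) (some 1) none) 1).foldl
        (fun a q => a.set q.2.toNat (v ++ "_" ++ PySem.Int.toStr q.1)) acc)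
      = fun (acc : List String) (v : String) =>
          innerRun v (((occPos arr v 0).map Int.ofNat).tail) 1 acc := by
    funext acc v
    rw [posDict_getD arr v, PySem.List.slice_from_one]
    rfl
  rw [show (fun (x : List String) (y : String) =>
      (PySem.List.enumerate (PySem.List.slice ((y,
        ((PySem.List.enumerate arr 0).foldl (fun d p => d.modify p.2 [] (· ++ [p.1]))
          (PySem.Dict.empty : PySem.Dict String (List Int))).getD y []).2) (some 1) none) 1).foldl
        (fun a q => a.set q.2.toNat ((y,
          ((PySem.List.enumerate arr 0).foldl (fun d p => d.modify p.2 [] (· ++ [p.1]))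
            (PySem.Dict.empty : PySem.Dict String (List Int))).getD y []).1 ++ "_"
            ++ PySem.Int.toStr q.1)) x)
      = fun (acc : List String) (v : String) =>
          innerRun v (((occPos arr v 0).map Int.ofNat).tail) 1 acc from hfun]
  obtain ⟨rlen, rhit, _⟩ := outer_fold arr (PySem.Set.ofList arr) arr
    (PySem.Set.nodup_ofList arr) rfl (fun j _ _ => rfl)
  refine ⟨rlen, fun j hj => rhit j hj ?_⟩
  rw [PySem.Set.mem_ofList, List.getD_eq_getElem arr "" hj]
  exact List.getElem_mem hj

-- ===== VERDICT (by name: the statement is the Claim_ definition above) =====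
theorem update_duplicates_with_suffix_spec : Claim_equal_update_duplicates_with_suffix := by
  intro arr _
  unfold Spec_update_duplicates_with_suffix
  obtain ⟨halen, hapt⟩ := A_pointwise arr
  obtain ⟨hblen, hbpt⟩ := B_pointwise arr
  apply List.ext_getElem (by rw [halen, hblen])
  intro j h1 h2
  have hj : j < arr.length := by rwa [halen] at h1
  have ha := hapt j hj
  have hb := hbpt j hj
  rw [List.getD_eq_getElem _ _ h1] at ha
  rw [List.getD_eq_getElem _ _ h2] at hb
  rw [ha, hb]
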